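-- pv_equiv track=rewrite | github.com/wilsalv-veri/SAURIA | verif/scripts/perf_analyzer/intervals.py | clip_intervals
-- ===== SOURCE A (Python) =====
-- def merge_intervals(intervals: list[tuple[int, int]]) -> list[tuple[int, int]]:
--     if not intervals:
--         return []
--
--     merged: list[tuple[int, int]] = []
--     for start, end in sorted(intervals):
--         if end <= start:
--             continue
--         if not merged or start > merged[-1][1]:
--             merged.append((start, end))
--             continue
--         merged[-1] = (merged[-1][0], max(merged[-1][1], end))
--     return merged
--
-- def clip_intervals(
--     intervals: list[tuple[int, int]],
--     start_time: int,
--     end_time: int,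
-- ) -> list[tuple[int, int]]:
--     clipped: list[tuple[int, int]] = []
--     for interval_start, interval_end in intervals:
--         bounded_start = max(interval_start, start_time)
--         bounded_end = min(interval_end, end_time)
--         if bounded_end > bounded_start:
--             clipped.append((bounded_start, bounded_end))
--     return merge_intervals(clipped)
-- ===== SOURCE B (Python) =====
-- def _insert(merged, s, e):
--     """Insert [s, e) into a sorted list of pairwise-disjoint, non-touching
--     intervals, merging it with any interval it overlaps or touches."""
--     if not merged:
--         return [(s, e)]
--     (a, b) = merged[0]
--     rest = merged[1:]
--     if e < a:
--         return [(s, e)] + merged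
--     if b < s:
--         return [(a, b)] + _insert(rest, s, e)
--     return _insert(rest, min(s, a), max(e, b))
--
--
-- def clip_intervals(intervals, start_time, end_time):
--     merged = []
--     for interval_start, interval_end in intervals:
--         bounded_start = max(interval_start, start_time)
--         bounded_end = min(interval_end, end_time)
--         if bounded_end > bounded_start:
--             merged = _insert(merged, bounded_start, bounded_end)
--     return merged
-- ===== Notes on version B (the rewrite author's own statement) =====
-- stated objective: alternative
-- what changed: Replaced the sort-then-linear-merge pipeline by an incremental interval-set: each clipped interval is inserted directly into a sorted list of disjoint intervals, absorbing every interval it overlaps or touches, so there is no sort and no separate merge pass.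
import Mathlib
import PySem

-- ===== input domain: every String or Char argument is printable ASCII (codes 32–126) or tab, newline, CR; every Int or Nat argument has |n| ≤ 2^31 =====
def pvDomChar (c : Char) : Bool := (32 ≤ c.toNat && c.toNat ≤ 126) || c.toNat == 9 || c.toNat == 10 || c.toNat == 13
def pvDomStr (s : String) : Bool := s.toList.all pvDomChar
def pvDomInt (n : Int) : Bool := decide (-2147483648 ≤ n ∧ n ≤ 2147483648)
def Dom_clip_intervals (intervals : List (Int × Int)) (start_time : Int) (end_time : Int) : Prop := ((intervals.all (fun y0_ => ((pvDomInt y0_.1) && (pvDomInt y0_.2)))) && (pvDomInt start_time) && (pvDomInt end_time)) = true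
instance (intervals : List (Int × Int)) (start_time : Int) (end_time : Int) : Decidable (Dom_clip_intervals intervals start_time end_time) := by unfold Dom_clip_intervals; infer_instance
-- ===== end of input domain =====

-- B replaces A's sort-then-merge pipeline by incremental insertion of each clipped
-- interval into a sorted disjoint-interval list (objective: alternative algorithm).

-- ===== PORT A =====
-- one iteration of merge_intervals' loop body (merged[-1] access / update included)
def mergeStep (merged : List (Int × Int)) (p : Int × Int) : List (Int × Int) :=
  if p.2 ≤ p.1 then merged
  else
    match merged.getLast? with
    | none => merged ++ [p]
    | some t => if p.1 > t.2 then merged ++ [p] else merged.dropLast ++ [(t.1, max t.2 p.2)]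

def merge_intervals (intervals : List (Int × Int)) : List (Int × Int) :=
  if intervals = [] then []
  else (PySem.List.sorted2 intervals Prod.fst Prod.snd).foldl mergeStep []

def clip_intervals (intervals : List (Int × Int)) (start_time : Int) (end_time : Int) : List (Int × Int) :=
  merge_intervals
    (intervals.foldl (fun clipped q =>
      let bounded_start := max q.1 start_time
      let bounded_end := min q.2 end_time
      if bounded_end > bounded_start then clipped ++ [(bounded_start, bounded_end)] else clipped) [])

-- ===== PORT B =====
-- _insert of Source B: put [s,e) into a sorted disjoint list, absorbing overlaps/touches
def insertAlt : List (Int × Int) → Int → Int → List (Int × Int)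
  | [], s, e => [(s, e)]
  | (a, b) :: rest, s, e =>
    if e < a then (s, e) :: (a, b) :: rest
    else if b < s then (a, b) :: insertAlt rest s e
    else insertAlt rest (min s a) (max e b)

def clip_intervals_alt (intervals : List (Int × Int)) (start_time : Int) (end_time : Int) : List (Int × Int) :=
  intervals.foldl (fun merged q =>
    let bounded_start := max q.1 start_time
    let bounded_end := min q.2 end_time
    if bounded_end > bounded_start then insertAlt merged bounded_start bounded_end else merged) []

-- ===== PRECONDITION & SPEC =====
def Spec_clip_intervals (intervals : List (Int × Int)) (start_time : Int) (end_time : Int) (out : List (Int × Int)) : Prop := out = clip_intervals_alt intervals start_time end_time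
instance (intervals : List (Int × Int)) (start_time : Int) (end_time : Int) (out : List (Int × Int)) : Decidable (Spec_clip_intervals intervals start_time end_time out) := by unfold Spec_clip_intervals; infer_instance

-- ===== CLAIM (what is proved, stated in full; the proofs are below) =====
def Claim_equal_clip_intervals : Prop := ∀ (intervals : List (Int × Int)) (start_time : Int) (end_time : Int), Dom_clip_intervals intervals start_time end_time → Spec_clip_intervals intervals start_time end_time (clip_intervals intervals start_time end_time)

-- ===== LEMMAS AND PROOFS =====

-- integer points covered by a list of half-open intervals
def cov (M : List (Int × Int)) (x : Int) : Prop := ∃ p ∈ M, p.1 ≤ x ∧ x < p.2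

-- a canonical merged list: sorted, pairwise separated by a gap, each nonempty
def Good (M : List (Int × Int)) : Prop :=
  M.Pairwise (fun p q => p.2 < q.1) ∧ ∀ p ∈ M, p.1 < p.2

theorem cov_nil (x : Int) : cov [] x ↔ False := by simp [cov]

theorem cov_cons (p : Int × Int) (M : List (Int × Int)) (x : Int) :
    cov (p :: M) x ↔ (p.1 ≤ x ∧ x < p.2) ∨ cov M x := by
  simp [cov]

theorem cov_append (M N : List (Int × Int)) (x : Int) :
    cov (M ++ N) x ↔ cov M x ∨ cov N x := by
  simp [cov, or_and_right, exists_or]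

theorem cov_perm {M N : List (Int × Int)} (h : M.Perm N) (x : Int) :
    cov M x ↔ cov N x := by
  unfold cov
  constructor <;> rintro ⟨p, hp, h1, h2⟩ <;> exact ⟨p, by first | exact h.mem_iff.mp hp | exact h.mem_iff.mpr hp, h1, h2⟩

theorem good_cons {a b : Int} {M : List (Int × Int)} (hG : Good ((a, b) :: M)) :
    Good M ∧ a < b ∧ ∀ q ∈ M, b < q.1 := by
  obtain ⟨hpw, hbd⟩ := hG
  have h := List.pairwise_cons.mp hpw
  exact ⟨⟨h.2, fun p hp => hbd p (List.mem_cons_of_mem _ hp)⟩, hbd (a, b) (by simp), h.1⟩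

theorem cov_head_lb {a b : Int} {M : List (Int × Int)} (hG : Good ((a, b) :: M)) {x : Int}
    (h : cov ((a, b) :: M) x) : a ≤ x := by
  obtain ⟨p, hp, h1, h2⟩ := h
  rcases List.mem_cons.mp hp with rfl | hp'
  · exact h1
  · have hb := (good_cons hG).2.2 p hp'
    have hab := (good_cons hG).2.1
    omega

theorem not_cov_head_end {a b : Int} {M : List (Int × Int)} (hG : Good ((a, b) :: M)) :
    ¬ cov ((a, b) :: M) b := by
  rintro ⟨p, hp, h1, h2⟩
  rcases List.mem_cons.mp hp with rfl | hp'
  · simp at h2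
  · have hb := (good_cons hG).2.2 p hp'
    omega

theorem cov_tail_iff {a b : Int} {M : List (Int × Int)} (hG : Good ((a, b) :: M)) (x : Int) :
    cov M x ↔ cov ((a, b) :: M) x ∧ b < x := by
  constructor
  · rintro ⟨p, hp, h1, h2⟩
    have hb := (good_cons hG).2.2 p hp
    exact ⟨⟨p, List.mem_cons_of_mem _ hp, h1, h2⟩, by omega⟩
  · rintro ⟨hc, hbx⟩
    rcases (cov_cons _ _ _).mp hc with h | h
    · simp at h; omega
    · exact h

theorem good_ext : ∀ (M N : List (Int × Int)), Good M → Good N →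
    (∀ x, cov M x ↔ cov N x) → M = N := by
  intro M
  induction M with
  | nil =>
    intro N hM hN h
    cases N with
    | nil => rfl
    | cons q N' =>
      exfalso
      have hq : cov (q :: N') q.1 := ⟨q, by simp, le_refl _, hN.2 q (by simp)⟩
      exact (cov_nil q.1).mp ((h q.1).mpr hq)
  | cons p M' ih =>
    intro N hM hN h
    obtain ⟨a, b⟩ := p
    have hab := (good_cons hM).2.1
    have hcovA : cov ((a, b) :: M') a := ⟨(a, b), by simp, le_refl _, hab⟩
    cases N with
    | nil => exact absurd ((h a).mp hcovA) (by simp [cov_nil])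
    | cons q N' =>
      obtain ⟨a', b'⟩ := q
      have hab' := (good_cons hN).2.1
      have hcovB : cov ((a', b') :: N') a' := ⟨(a', b'), by simp, le_refl _, hab'⟩
      have haa' : a = a' := by
        have h1 := cov_head_lb hN ((h a).mp hcovA)
        have h2 := cov_head_lb hM ((h a').mpr hcovB)
        omega
      subst haa'
      have hbb' : b = b' := by
        rcases lt_trichotomy b b' with hlt | heq | hgt
        · exfalso
          have : cov ((a, b') :: N') b := ⟨(a, b'), by simp, by omega, by omega⟩
          exact not_cov_head_end hM ((h b).mpr this)
        · exact heq
        · exfalso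
          have : cov ((a, b) :: M') b' := ⟨(a, b), by simp, by omega, by omega⟩
          exact not_cov_head_end hN ((h b').mp this)
      subst hbb'
      have htail : ∀ x, cov M' x ↔ cov N' x := by
        intro x
        rw [cov_tail_iff hM x, cov_tail_iff hN x, h x]
      rw [ih N' (good_cons hM).1 (good_cons hN).1 htail]

theorem insertAlt_start_lb : ∀ (M : List (Int × Int)) (s e c : Int),
    (∀ q ∈ M, c < q.1) → c < s → ∀ q ∈ insertAlt M s e, c < q.1 := by
  intro M
  induction M with
  | nil =>
    intro s e c _ hs q hq
    simp [insertAlt] at hq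
    simp [hq, hs]
  | cons p rest ih =>
    intro s e c hM hs q hq
    obtain ⟨a, b⟩ := p
    have ha : c < a := by simpa using hM (a, b) (by simp)
    simp only [insertAlt] at hq
    split_ifs at hq with h1 h2
    · rcases List.mem_cons.mp hq with rfl | hq'
      · simpa using hs
      · exact hM q (by simpa using hq')
    · rcases List.mem_cons.mp hq with rfl | hq'
      · simpa using ha
      · exact ih s e c (fun r hr => hM r (List.mem_cons_of_mem _ hr)) hs q hq'
    · exact ih (min s a) (max e b) c (fun r hr => hM r (List.mem_cons_of_mem _ hr)) (by omega) q hq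

theorem insertAlt_good : ∀ (M : List (Int × Int)) (s e : Int),
    Good M → s < e → Good (insertAlt M s e) := by
  intro M
  induction M with
  | nil =>
    intro s e _ hse
    exact ⟨List.pairwise_singleton _ _, by intro p hp; simp [insertAlt] at hp; simp [hp, hse]⟩
  | cons p rest ih =>
    intro s e hG hse
    obtain ⟨a, b⟩ := p
    obtain ⟨hGrest, hab, hgap⟩ := good_cons hG
    simp only [insertAlt]
    split_ifs with h1 h2
    · constructor
      · refine List.pairwise_cons.mpr ⟨?_, hG.1⟩
        intro q hq
        rcases List.mem_cons.mp hq with rfl | hq'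
        · simpa using h1
        · have := hgap q hq'; simp; omega
      · intro q hq
        rcases List.mem_cons.mp hq with rfl | hq'
        · simpa using hse
        · exact hG.2 q hq'
    · have hIns := ih s e hGrest hse
      constructor
      · refine List.pairwise_cons.mpr ⟨?_, hIns.1⟩
        intro q hq
        exact insertAlt_start_lb rest s e b hgap h2 q hq
      · intro q hq
        rcases List.mem_cons.mp hq with rfl | hq'
        · simpa using hab
        · exact hIns.2 q hq'
    · exact ih (min s a) (max e b) hGrest (by omega)

theorem insertAlt_cov : ∀ (M : List (Int × Int)) (s e x : Int),
    (∀ p ∈ M, p.1 < p.2) → s < e →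
    (cov (insertAlt M s e) x ↔ (s ≤ x ∧ x < e) ∨ cov M x) := by
  intro M
  induction M with
  | nil =>
    intro s e x _ _
    simp [insertAlt, cov]
  | cons p rest ih =>
    intro s e x hbd hse
    obtain ⟨a, b⟩ := p
    have hab : a < b := by simpa using hbd (a, b) (by simp)
    have hbd' : ∀ q ∈ rest, q.1 < q.2 := fun q hq => hbd q (List.mem_cons_of_mem _ hq)
    simp only [insertAlt]
    split_ifs with h1 h2
    · simp only [cov_cons]
    · rw [cov_cons, ih s e x hbd' hse]
      simp only [cov_cons]
      tauto
    · rw [ih (min s a) (max e b) x hbd' (by omega)]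
      simp only [cov_cons]
      have harith : (min s a ≤ x ∧ x < max e b) ↔ (s ≤ x ∧ x < e) ∨ (a ≤ x ∧ x < b) := by
        simp only [not_lt] at h1 h2
        omega
      simp only [harith]
      tauto

-- coverage contributed by the clipped copies of a list of raw intervals
def covClip (L : List (Int × Int)) (st et x : Int) : Prop :=
  ∃ p ∈ L, max p.1 st ≤ x ∧ x < min p.2 et

theorem altFold : ∀ (L : List (Int × Int)) (st et : Int) (M : List (Int × Int)), Good M →
    Good (L.foldl (fun merged q =>
        let bs := max q.1 st
        let be := min q.2 et
        if be > bs then insertAlt merged bs be else merged) M) ∧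
    ∀ x, cov (L.foldl (fun merged q =>
        let bs := max q.1 st
        let be := min q.2 et
        if be > bs then insertAlt merged bs be else merged) M) x ↔ cov M x ∨ covClip L st et x := by
  intro L st et
  induction L with
  | nil =>
    intro M hG
    refine ⟨hG, fun x => ?_⟩
    simp [covClip]
  | cons q L' ih =>
    intro M hG
    obtain ⟨u, v⟩ := q
    have hclip : ∀ x, covClip ((u, v) :: L') st et x ↔
        (max u st ≤ x ∧ x < min v et) ∨ covClip L' st et x := by
      intro x; simp [covClip]
    simp only [List.foldl_cons]
    by_cases hc : min v et > max u st
    · have hG' := insertAlt_good M (max u st) (min v et) hG hc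
      have hstep := ih (insertAlt M (max u st) (min v et)) hG'
      refine ⟨by simpa [hc] using hstep.1, fun x => ?_⟩
      have hcv := insertAlt_cov M (max u st) (min v et) x hG.2 hc
      rw [if_pos hc]
      rw [hstep.2 x, hcv, hclip x]
      tauto
    · have hstep := ih M hG
      refine ⟨by simpa [hc] using hstep.1, fun x => ?_⟩
      rw [if_neg hc]
      rw [hstep.2 x, hclip x]
      have : ¬ (max u st ≤ x ∧ x < min v et) := by omega
      tauto

theorem clipFold_cov : ∀ (L : List (Int × Int)) (st et : Int) (acc : List (Int × Int)) (x : Int),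
    cov (L.foldl (fun clipped q =>
        let bs := max q.1 st
        let be := min q.2 et
        if be > bs then clipped ++ [(bs, be)] else clipped) acc) x ↔ cov acc x ∨ covClip L st et x := by
  intro L st et
  induction L with
  | nil =>
    intro acc x
    simp [covClip]
  | cons q L' ih =>
    intro acc x
    obtain ⟨u, v⟩ := q
    have hclip : covClip ((u, v) :: L') st et x ↔
        (max u st ≤ x ∧ x < min v et) ∨ covClip L' st et x := by
      simp [covClip]
    simp only [List.foldl_cons]
    by_cases hc : min v et > max u st
    · rw [if_pos hc]
      rw [ih (acc ++ [(max u st, min v et)]) x, cov_append, hclip]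
      simp only [cov_cons, cov_nil]
      tauto
    · rw [if_neg hc]
      rw [ih acc x, hclip]
      have : ¬ (max u st ≤ x ∧ x < min v et) := by omega
      tauto

-- the lexicographic 'before' comparison sorted2 uses internally
def lexBefore (p q : Int × Int) : Bool :=
  decide (p.1 < q.1) || (!decide (q.1 < p.1) && decide (p.2 < q.2))

theorem sorted2_eq_foldl (xs : List (Int × Int)) :
    PySem.List.sorted2 xs Prod.fst Prod.snd
      = xs.foldl (fun acc x => PySem.List.insertBy lexBefore x acc) [] := rfl

theorem lexBefore_asymm {p q : Int × Int} (h : lexBefore p q = true) : lexBefore q p = false := by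
  simp [lexBefore] at h ⊢
  omega

theorem lexBefore_chain {x y z : Int × Int} (h1 : lexBefore x y = true)
    (h2 : lexBefore z y = false) : lexBefore z x = false := by
  simp [lexBefore] at h1 h2 ⊢
  omega

theorem insertBy_lex_pairwise : ∀ (ys : List (Int × Int)) (x : Int × Int),
    ys.Pairwise (fun p q => lexBefore q p = false) →
    (PySem.List.insertBy lexBefore x ys).Pairwise (fun p q => lexBefore q p = false) := by
  intro ys
  induction ys with
  | nil =>
    intro x _
    simp [PySem.List.insertBy]
  | cons y ys ih =>
    intro x hp
    have hp' := List.pairwise_cons.mp hp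
    simp only [PySem.List.insertBy]
    split_ifs with hxy
    · refine List.pairwise_cons.mpr ⟨?_, hp⟩
      intro z hz
      rcases List.mem_cons.mp hz with rfl | hz'
      · exact lexBefore_asymm hxy
      · exact lexBefore_chain hxy (hp'.1 z hz')
    · refine List.pairwise_cons.mpr ⟨?_, ih x hp'.2⟩
      intro z hz
      rcases (PySem.List.mem_insertBy _ _ _ _).mp hz with rfl | hz'
      · exact Bool.of_not_eq_true hxy
      · exact hp'.1 z hz'

theorem foldl_insertBy_pairwise : ∀ (xs acc : List (Int × Int)),
    acc.Pairwise (fun p q => lexBefore q p = false) →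
    (xs.foldl (fun acc x => PySem.List.insertBy lexBefore x acc) acc).Pairwise
      (fun p q => lexBefore q p = false) := by
  intro xs
  induction xs with
  | nil => intro acc h; exact h
  | cons x xs ih =>
    intro acc h
    exact ih _ (insertBy_lex_pairwise acc x h)

theorem sorted2_fst_pairwise (xs : List (Int × Int)) :
    (PySem.List.sorted2 xs Prod.fst Prod.snd).Pairwise (fun p q => p.1 ≤ q.1) := by
  rw [sorted2_eq_foldl]
  refine (foldl_insertBy_pairwise xs [] (List.Pairwise.nil)).imp ?_
  intro p q h
  simp [lexBefore] at h
  omega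

theorem mergeFold : ∀ (L M : List (Int × Int)),
    L.Pairwise (fun p q => p.1 ≤ q.1) → Good M →
    (∀ q ∈ L, ∀ t ∈ M.getLast?, t.1 ≤ q.1) →
    Good (L.foldl mergeStep M) ∧ ∀ x, (cov (L.foldl mergeStep M) x ↔ cov M x ∨ cov L x) := by
  intro L
  induction L with
  | nil =>
    intro M _ hG _
    exact ⟨hG, fun x => by simp [cov_nil]⟩
  | cons p L' ih =>
    intro M hpw hG hlast
    obtain ⟨s, e⟩ := p
    have hpw' := List.pairwise_cons.mp hpw
    have hfst : ∀ q ∈ L', s ≤ q.1 := fun q hq => hpw'.1 q hq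
    simp only [List.foldl_cons]
    by_cases hse : e ≤ s
    · -- degenerate interval: skipped
      rw [show mergeStep M (s, e) = M by simp [mergeStep, hse]]
      have hrec := ih M hpw'.2 hG (fun q hq => hlast q (List.mem_cons_of_mem _ hq))
      refine ⟨hrec.1, fun x => ?_⟩
      rw [hrec.2 x, cov_cons]
      have : ¬ ((s, e).1 ≤ x ∧ x < (s, e).2) := by simp; omega
      tauto
    · rcases hM : M.getLast? with _ | ⟨a, b⟩
      · -- merged empty: append
        have hMnil : M = [] := by simpa using hM
        subst hMnil
        rw [show mergeStep [] (s, e) = [(s, e)] by simp [mergeStep, hse]]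
        have hG1 : Good [(s, e)] := ⟨List.pairwise_singleton _ _, by
          intro q hq; simp at hq; simp [hq]; omega⟩
        have hlast1 : ∀ q ∈ L', ∀ t ∈ ([(s, e)] : List (Int × Int)).getLast?, t.1 ≤ q.1 := by
          intro q hq t ht
          simp at ht
          subst ht
          simpa using hfst q hq
        have hrec := ih [(s, e)] hpw'.2 hG1 hlast1
        refine ⟨hrec.1, fun x => ?_⟩
        rw [hrec.2 x]
        simp only [cov_cons, cov_nil]
        tauto
      · obtain ⟨ys, rfl⟩ := List.getLast?_eq_some_iff.mp hM
        have hpa := List.pairwise_append.mp hG.1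
        have hys_lt : ∀ u ∈ ys, u.2 < a := by
          intro u hu
          simpa using hpa.2.2 u hu (a, b) (by simp)
        have hab : a < b := by simpa using hG.2 (a, b) (by simp)
        have has : a ≤ s := by simpa using hlast (s, e) (by simp) (a, b) (by simp)
        by_cases hsb : s > b
        · -- gap: new block appended
          rw [show mergeStep (ys ++ [(a, b)]) (s, e) = (ys ++ [(a, b)]) ++ [(s, e)] by
            simp [mergeStep, hse, hsb]]
          have hG1 : Good ((ys ++ [(a, b)]) ++ [(s, e)]) := by
            constructor
            · refine List.pairwise_append.mpr ⟨hG.1, List.pairwise_singleton _ _, ?_⟩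
              intro u hu v hv
              simp at hv
              rcases List.mem_append.mp hu with hu' | hu'
              · have := hys_lt u hu'; simp [hv]; omega
              · simp at hu'; simp [hu', hv]; omega
            · intro q hq
              rcases List.mem_append.mp hq with hq' | hq'
              · exact hG.2 q hq'
              · simp at hq'; simp [hq']; omega
          have hlast1 : ∀ q ∈ L', ∀ t ∈ ((ys ++ [(a, b)]) ++ [(s, e)]).getLast?, t.1 ≤ q.1 := by
            intro q hq t ht
            simp at ht
            subst ht
            simpa using hfst q hq
          have hrec := ih _ hpw'.2 hG1 hlast1
          refine ⟨hrec.1, fun x => ?_⟩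
          rw [hrec.2 x, cov_append, cov_cons]
          simp only [cov_cons, cov_nil]
          tauto
        · -- overlap/touch: extend last block
          rw [show mergeStep (ys ++ [(a, b)]) (s, e) = ys ++ [(a, max b e)] by
            simp [mergeStep, hse, hsb]]
          have hG1 : Good (ys ++ [(a, max b e)]) := by
            constructor
            · refine List.pairwise_append.mpr ⟨hpa.1, List.pairwise_singleton _ _, ?_⟩
              intro u hu v hv
              simp at hv
              have := hys_lt u hu; simp [hv]; omega
            · intro q hq
              rcases List.mem_append.mp hq with hq' | hq'
              · exact hG.2 q (List.mem_append_left _ hq')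
              · simp at hq'; simp [hq']; omega
          have hlast1 : ∀ q ∈ L', ∀ t ∈ (ys ++ [(a, max b e)]).getLast?, t.1 ≤ q.1 := by
            intro q hq t ht
            simp at ht
            subst ht
            have := hfst q hq; simp; omega
          have hrec := ih _ hpw'.2 hG1 hlast1
          refine ⟨hrec.1, fun x => ?_⟩
          rw [hrec.2 x, cov_append, cov_append, cov_cons]
          simp only [cov_cons, cov_nil]
          have harith : (a ≤ x ∧ x < max b e) ↔ (a ≤ x ∧ x < b) ∨ (s ≤ x ∧ x < e) := by omega
          tauto

-- ===== VERDICT (by name: the statement is the Claim_ definition above) =====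
theorem goodnil : Good [] := ⟨List.Pairwise.nil, by simp⟩

theorem clip_intervals_spec : Claim_equal_clip_intervals := by
  intro intervals start_time end_time _
  unfold Spec_clip_intervals clip_intervals clip_intervals_alt merge_intervals
  have hB := altFold intervals start_time end_time [] goodnil
  have hcovC : ∀ x, cov (intervals.foldl (fun clipped q =>
      let bs := max q.1 start_time
      let be := min q.2 end_time
      if be > bs then clipped ++ [(bs, be)] else clipped) []) x ↔
      covClip intervals start_time end_time x := by
    intro x
    have := clipFold_cov intervals start_time end_time [] x
    rw [this]
    simp [cov_nil]
  split_ifs with h0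
  · -- clipped list empty: A returns []
    refine good_ext [] _ goodnil hB.1 ?_
    intro x
    rw [hB.2 x]
    have := hcovC x
    rw [h0] at this
    simp only [cov_nil] at this ⊢
    tauto
  · have hA := mergeFold _ []
      (sorted2_fst_pairwise (intervals.foldl (fun clipped q =>
        let bs := max q.1 start_time
        let be := min q.2 end_time
        if be > bs then clipped ++ [(bs, be)] else clipped) []))
      goodnil (by intro q hq t ht; simp at ht)
    refine good_ext _ _ hA.1 hB.1 ?_
    intro x
    rw [hA.2 x, hB.2 x]
    rw [cov_perm (PySem.List.sorted2_perm _ _ _ _) x, hcovC x]
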